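-- pv_equiv track=rewrite | github.com/ogmobot/aoc2018 | day25.py | constellate
-- ===== SOURCE A (Python) =====
-- def manhattan(a, b):
--     return sum(map((lambda ax, bx: abs(ax - bx)), a, b))
--
-- def constellate(stars):
--     # stars is a list of constellations
--     if not stars:
--         return []
--     first, rest = stars[0], stars[1:]
--     for i, candidate in enumerate(rest):
--         if any(manhattan(a, b) <= 3 for a in first for b in candidate):
--             return constellate(rest[:i] + rest[i + 1:] + [candidate + first])
--     return [first] + constellate(rest)
-- ===== SOURCE B (Python) =====
-- def manhattan(a, b):
--     return sum(map((lambda ax, bx: abs(ax - bx)), a, b))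
--
-- def constellate(stars):
--     result = []
--     work = list(stars)
--     while work:
--         first = work.pop(0)
--         i = next((k for k, c in enumerate(work)
--                   if any(manhattan(a, b) <= 3 for a in first for b in c)), None)
--         if i is None:
--             result.append(first)
--         else:
--             work.append(work.pop(i) + first)
--     return result
-- ===== Notes on version B (the rewrite author's own statement) =====
-- stated objective: alternative
-- what changed: A's recursion (which rebuilds the worklist by slice concatenation and re-descends on every step, risking RecursionError on deep inputs) is replaced by an iterative while-loop over an explicit worklist with a result accumulator, using in-place pop and a next-over-enumerate scan.
import Mathlib
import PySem

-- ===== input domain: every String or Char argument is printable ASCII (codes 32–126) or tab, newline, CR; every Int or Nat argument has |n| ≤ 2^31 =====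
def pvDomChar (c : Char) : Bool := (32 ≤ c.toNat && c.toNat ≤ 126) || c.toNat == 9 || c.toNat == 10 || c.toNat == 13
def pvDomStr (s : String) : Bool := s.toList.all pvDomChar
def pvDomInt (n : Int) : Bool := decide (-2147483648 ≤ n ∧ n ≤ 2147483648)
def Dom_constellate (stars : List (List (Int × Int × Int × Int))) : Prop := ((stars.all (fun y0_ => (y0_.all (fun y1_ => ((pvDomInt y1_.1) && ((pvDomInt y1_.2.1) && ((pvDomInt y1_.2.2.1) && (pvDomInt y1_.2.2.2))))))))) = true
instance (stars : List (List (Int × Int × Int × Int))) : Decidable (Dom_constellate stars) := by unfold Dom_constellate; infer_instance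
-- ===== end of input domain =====

-- B replaces A's recursion (which rebuilds the worklist and re-descends) by an iterative
-- worklist loop with an explicit result accumulator: same values, tail-recursive decomposition.

-- ===== PORT A =====
-- manhattan(a, b) for 4-tuples: sum of |ax - bx|
def pvManhattan (a b : Int × Int × Int × Int) : Int :=
  |a.1 - b.1| + |a.2.1 - b.2.1| + |a.2.2.1 - b.2.2.1| + |a.2.2.2 - b.2.2.2|

-- any(manhattan(a, b) <= 3 for a in first for b in candidate)
def pvClose (first candidate : List (Int × Int × Int × Int)) : Bool :=
  first.any (fun a => candidate.any (fun b => pvManhattan a b ≤ 3))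

-- the enumerate-based for loop: first (i, candidate) passing the test, else none
def constellate (stars : List (List (Int × Int × Int × Int))) : List (List (Int × Int × Int × Int)) :=
  match stars with
  | [] => []
  | first :: rest =>
    match h : (PySem.List.enumerate rest).find? (fun ic => pvClose first ic.2) with
    | some (i, candidate) =>
        -- return constellate(rest[:i] + rest[i+1:] + [candidate + first])
        constellate (PySem.List.slice rest none (some i) ++
                     PySem.List.slice rest (some (i + 1)) none ++ [candidate ++ first])
    | none => first :: constellate rest
termination_by stars.length
decreasing_by
  · have hmem := List.mem_of_find?_eq_some h
    rw [PySem.List.mem_enumerate_iff] at hmem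
    obtain ⟨k, hk, hp⟩ := hmem
    obtain ⟨hi, hc⟩ := Prod.mk.injEq .. ▸ hp
    subst hi
    have h1 : PySem.List.slice rest none (some ((k : Nat) : Int)) = rest.take k :=
      PySem.List.slice_to_natCast rest k
    have h2 : PySem.List.slice rest (some (((k : Nat) : Int) + 1)) none = rest.drop (k + 1) := by
      rw [show ((k : Nat) : Int) + 1 = (((k + 1 : Nat)) : Int) by push_cast; ring]
      exact PySem.List.slice_from_natCast rest (k + 1)
    simp only [zero_add]
    rw [h1, h2]
    simp only [List.length_append, List.length_take, List.length_drop, List.length_cons,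
      List.length_nil]
    omega
  · simp

-- ===== PORT B =====
-- the while-loop: work is the remaining worklist, acc the result list so far
def altLoop (work acc : List (List (Int × Int × Int × Int))) : List (List (Int × Int × Int × Int)) :=
  match work with
  | [] => acc
  | first :: rest =>
    match h : rest.findIdx? (pvClose first) with
    | some i => altLoop (rest.eraseIdx i ++ [rest.getD i [] ++ first]) acc
    | none => altLoop rest (acc ++ [first])
termination_by work.length
decreasing_by
  · have hi : i < rest.length := (List.findIdx?_eq_some_iff_findIdx_eq.mp h).1
    simp [List.length_eraseIdx, hi]
    omega
  · simp

def constellate_alt (stars : List (List (Int × Int × Int × Int))) : List (List (Int × Int × Int × Int)) :=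
  altLoop stars []

-- ===== PRECONDITION & SPEC =====
def Spec_constellate (stars : List (List (Int × Int × Int × Int))) (out : List (List (Int × Int × Int × Int))) : Prop := out = constellate_alt stars
instance (stars : List (List (Int × Int × Int × Int))) (out : List (List (Int × Int × Int × Int))) : Decidable (Spec_constellate stars out) := by unfold Spec_constellate; infer_instance

-- ===== CLAIM (what is proved, stated in full; the proofs are below) =====
def Claim_equal_constellate : Prop := ∀ (stars : List (List (Int × Int × Int × Int))), Dom_constellate stars → Spec_constellate stars (constellate stars)

-- ===== LEMMAS AND PROOFS =====

-- A's enumerate-based scan is B's findIdx? scan, with the index shifted by the start.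
theorem find_enumerate_eq (p : List (Int × Int × Int × Int) → Bool)
    (rest : List (List (Int × Int × Int × Int))) (s : Int) :
    (PySem.List.enumerate rest s).find? (fun ic => p ic.2) =
      (rest.findIdx? p).map (fun (i : Nat) => (s + (i : Int), rest.getD i [])) := by
  induction rest generalizing s with
  | nil => simp [PySem.List.enumerate_nil]
  | cons x xs ih =>
    rw [PySem.List.enumerate_cons, List.findIdx?_cons]
    by_cases hp : p x
    · simp [hp]
    · have hpx : p x = false := by simpa using hp
      rw [List.find?_cons, hpx]
      simp only [Bool.false_eq_true, if_false]
      rw [ih (s + 1)]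
      cases hfi : xs.findIdx? p with
      | none => simp
      | some i =>
        simp only [Option.map_some]
        simp
        ring

theorem altLoop_eq (work acc : List (List (Int × Int × Int × Int))) :
    altLoop work acc = acc ++ constellate work := by
  induction hn : work.length using Nat.strong_induction_on generalizing work acc with
  | _ n ih =>
  match work with
  | [] => simp [altLoop, constellate]
  | first :: rest =>
    rw [altLoop, constellate]
    rw [find_enumerate_eq (pvClose first) rest 0]
    cases hfi : rest.findIdx? (pvClose first) with
    | none =>
      simp only [Option.map_none]
      rw [ih rest.length (by simp [← hn]) rest (acc ++ [first]) rfl]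
      simp
    | some i =>
      have hi : i < rest.length := by
        have := List.findIdx?_eq_some_iff_findIdx_eq.mp hfi; omega
      simp only [Option.map_some]
      have h1 : PySem.List.slice rest none (some ((0:Int) + i)) = rest.take i := by
        rw [show (0:Int) + i = ((i : Nat) : Int) by ring]
        exact PySem.List.slice_to_natCast rest i
      have h2 : PySem.List.slice rest (some ((0:Int) + i + 1)) none = rest.drop (i + 1) := by
        rw [show (0:Int) + i + 1 = (((i + 1 : Nat)) : Int) by push_cast; ring]
        exact PySem.List.slice_from_natCast rest (i + 1)
      rw [h1, h2, ← List.eraseIdx_eq_take_drop_succ]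
      exact ih _ (by simp [← hn, List.length_eraseIdx, hi]; omega) _ acc rfl

-- ===== VERDICT (by name: the statement is the Claim_ definition above) =====
theorem constellate_spec : Claim_equal_constellate := by
  intro stars _
  unfold Spec_constellate constellate_alt
  rw [altLoop_eq]
  simp
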